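-- pv_equiv track=rewrite | github.com/CoolMcRad/TietokantaSovellus | utils/pages.py | tuotteetPaitsi1
-- ===== SOURCE A (Python) =====
-- def tuotteetPaitsi1(idt, ei_id):
--     tuotteet = []
--     maara = 1
--     if idt == None:
--         return tuotteet
--     else:
--         for integer in idt[0]:
--             if integer == ei_id:
--                 if maara == 0:
--                     tuotteet.append(integer)
--
--             if integer != ei_id:
--                 tuotteet.append(integer)
--             else:
--                 maara = 0
--
--         return tuotteet
-- ===== SOURCE B (Python) =====
-- def tuotteetPaitsi1(idt, ei_id):
--     if idt is None:
--         return []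
--     tuotteet = list(idt[0])
--     if ei_id in tuotteet:
--         tuotteet.remove(ei_id)
--     return tuotteet
-- ===== Notes on version B (the rewrite author's own statement) =====
-- stated objective: simpler
-- what changed: Replaces A's flagged single-pass accumulation (maara flag plus per-element branch pair) with a copy + membership test + remove-first-occurrence decomposition.
import Mathlib
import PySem

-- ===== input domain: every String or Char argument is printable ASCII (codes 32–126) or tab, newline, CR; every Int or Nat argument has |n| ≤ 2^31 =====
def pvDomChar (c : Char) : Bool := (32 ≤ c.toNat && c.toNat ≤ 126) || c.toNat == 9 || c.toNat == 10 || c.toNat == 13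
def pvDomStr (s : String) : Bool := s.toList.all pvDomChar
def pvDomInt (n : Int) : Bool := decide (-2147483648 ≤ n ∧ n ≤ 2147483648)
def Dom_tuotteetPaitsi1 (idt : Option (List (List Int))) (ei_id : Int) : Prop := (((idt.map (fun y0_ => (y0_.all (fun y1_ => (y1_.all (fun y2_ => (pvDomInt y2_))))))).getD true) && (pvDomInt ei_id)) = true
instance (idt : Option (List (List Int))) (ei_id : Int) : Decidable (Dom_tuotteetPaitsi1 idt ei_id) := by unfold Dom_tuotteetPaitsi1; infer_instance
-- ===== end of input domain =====

-- B replaces A's flagged single-pass loop by a copy + membership test + remove-first-occurrence (simpler).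

-- ===== PORT A =====
-- the loop body, carrying the pair (tuotteet, maara) exactly as A does
def pvStepA (ei_id : Int) (st : List Int × Int) (integer : Int) : List Int × Int :=
  let tuotteet := st.1
  let maara := st.2
  let tuotteet :=
    if integer == ei_id then
      (if maara == 0 then tuotteet ++ [integer] else tuotteet)
    else tuotteet
  if integer != ei_id then (tuotteet ++ [integer], maara)
  else (tuotteet, 0)

def tuotteetPaitsi1 (idt : Option (List (List Int))) (ei_id : Int) : List Int :=
  match idt with
  | none => []
  | some idtl =>
    match PySem.List.pyGet? idtl 0 with
    | none => []  -- IndexError in Python; excluded by Pre_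
    | some l => (l.foldl (pvStepA ei_id) ([], 1)).1
-- ===== PORT B =====
def tuotteetPaitsi1_alt (idt : Option (List (List Int))) (ei_id : Int) : List Int :=
  match idt with
  | none => []
  | some idtl =>
    match PySem.List.pyGet? idtl 0 with
    | none => []  -- IndexError in Python; excluded by Pre_
    | some tuotteet =>
      if ei_id ∈ tuotteet then
        match PySem.List.remove? tuotteet ei_id with
        | some r => r
        | none => tuotteet
      else tuotteet

-- ===== PRECONDITION & SPEC =====
-- Pre_ excludes only idt = some [] , where both A and B raise IndexError on idt[0].
def Pre_tuotteetPaitsi1 (idt : Option (List (List Int))) (ei_id : Int) : Prop := idt ≠ some []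
instance (idt : Option (List (List Int))) (ei_id : Int) : Decidable (Pre_tuotteetPaitsi1 idt ei_id) := by unfold Pre_tuotteetPaitsi1; infer_instance
def pvWitness_tuotteetPaitsi1 : Option (List (List Int)) × Int := (some [[1, 2, 1, 3]], 1)

def Spec_tuotteetPaitsi1 (idt : Option (List (List Int))) (ei_id : Int) (out : List Int) : Prop := out = tuotteetPaitsi1_alt idt ei_id
instance (idt : Option (List (List Int))) (ei_id : Int) (out : List Int) : Decidable (Spec_tuotteetPaitsi1 idt ei_id out) := by unfold Spec_tuotteetPaitsi1; infer_instance

-- ===== CLAIM (what is proved, stated in full; the proofs are below) =====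
def Claim_equal_tuotteetPaitsi1 : Prop := ∀ (idt : Option (List (List Int))) (ei_id : Int), Dom_tuotteetPaitsi1 idt ei_id → Pre_tuotteetPaitsi1 idt ei_id → Spec_tuotteetPaitsi1 idt ei_id (tuotteetPaitsi1 idt ei_id)

-- ===== LEMMAS AND PROOFS =====

theorem pvStepA_zero (ei_id x : Int) (acc : List Int) :
    pvStepA ei_id (acc, 0) x = (acc ++ [x], 0) := by
  by_cases h : x = ei_id <;> simp [pvStepA, h]

theorem pvStepA_one_ne (ei_id x : Int) (acc : List Int) (h : x ≠ ei_id) :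
    pvStepA ei_id (acc, 1) x = (acc ++ [x], 1) := by
  simp [pvStepA, h]

theorem pvStepA_one_eq (ei_id : Int) (acc : List Int) :
    pvStepA ei_id (acc, 1) ei_id = (acc, 0) := by
  simp [pvStepA]

-- after the flag drops to 0, A appends everything
theorem pvFoldZero (ei_id : Int) (l acc : List Int) :
    l.foldl (pvStepA ei_id) (acc, 0) = (acc ++ l, 0) := by
  induction l generalizing acc with
  | nil => simp
  | cons x xs ih => rw [List.foldl_cons, pvStepA_zero, ih]; simp

-- with the flag still 1, A's loop computes acc ++ (l with first ei_id removed)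
theorem pvFoldOne (ei_id : Int) (l acc : List Int) :
    (l.foldl (pvStepA ei_id) (acc, 1)).1
    = acc ++ (if ei_id ∈ l then
        match PySem.List.remove? l ei_id with
        | some r => r
        | none => l
      else l) := by
  induction l generalizing acc with
  | nil => simp
  | cons x xs ih =>
    by_cases h : x = ei_id
    · subst h
      rw [List.foldl_cons, pvStepA_one_eq, pvFoldZero]
      simp
    · rw [List.foldl_cons, pvStepA_one_ne _ _ _ h, ih]
      have hmem : (ei_id ∈ x :: xs) ↔ (ei_id ∈ xs) := by
        simp [List.mem_cons]
        intro hc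
        exact absurd hc.symm h
      by_cases hm : ei_id ∈ xs
      · rw [if_pos hm, if_pos (hmem.mpr hm),
            PySem.List.remove?_eq_some_erase xs ei_id hm,
            PySem.List.remove?_eq_some_erase (x :: xs) ei_id (hmem.mpr hm)]
        simp [h]
      · rw [if_neg hm, if_neg (fun hc => hm (hmem.mp hc))]
        simp

-- ===== VERDICT (by name: the statement is the Claim_ definition above) =====
theorem tuotteetPaitsi1_spec : Claim_equal_tuotteetPaitsi1 := by
  intro idt ei_id _ hpre
  unfold Spec_tuotteetPaitsi1 tuotteetPaitsi1 tuotteetPaitsi1_alt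
  cases idt with
  | none => rfl
  | some idtl =>
    cases hget : PySem.List.pyGet? idtl 0 with
    | none => simp [hget]
    | some l => simp only [hget]; exact pvFoldOne ei_id l []
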